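-- pv_equiv track=rewrite | github.com/joshanashakya/dissertation | workspace/dataset/java-python/GeeksForGeeks/3883/A/2.py | countDecreasingPathsMatrix
-- ===== SOURCE A (Python) =====
-- def CountDecreasingPathsCell(mat, dp, n, x, y):
--
--     # checkinf if already calculated
--     if (dp[x][y] != -1):
--         return dp[x][y]
--
--     # all possible paths
--     delta = [[0, 1], [1, 0],
--              [-1, 0], [0, -1]]
--     newx, newy = 0, 0
--
--     # counts the total number of paths
--     ans = 1
--
--     # In all four allowed direction.
--     for i in range(4):
--
--         # new co-ordinates
--         newx = x + delta[i][0]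
--         newy = y + delta[i][1]
--
--         # Checking if not going out of matrix and next
--         # cell value is less than current cell value.
--         if (newx >= 0 and newx < n and newy >= 0 and
--             newy < n and mat[newx][newy] < mat[x][y]):
--             ans += CountDecreasingPathsCell(mat, dp, n,
--                                             newx, newy)
--
--     # fucntion that returns the answer
--     dp[x][y] = ans
--     return dp[x][y]
--
-- def countDecreasingPathsMatrix(n,mat):
--     dp = []
--
--     # Initalising dp[][] to -1.
--     for i in range(n):
--         l = []
--         for j in range(n):
--             l.append(-1)
--         dp.append(l)
--     sum = 0
--
--     # Calculating number of decreasing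
--     # path from each cell.
--     for i in range(n):
--         for j in range(n):
--             sum += CountDecreasingPathsCell(mat, dp,
--                                             n, i, j)
--     return sum
-- ===== SOURCE B (Python) =====
-- def countDecreasingPathsMatrix(n, mat):
--     cells = []
--     for i in range(n):
--         for j in range(n):
--             cells.append((mat[i][j], i, j))
--     cells = sorted(cells, key=lambda c: c[0])
--     dp = {}
--     total = 0
--     for v, x, y in cells:
--         s = 1
--         for dx, dy in [[0, 1], [1, 0], [-1, 0], [0, -1]]:
--             nx, ny = x + dx, y + dy
--             if 0 <= nx < n and 0 <= ny < n and mat[nx][ny] < v: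
--                 s += dp.get((nx, ny), 0)
--         dp[(x, y)] = s
--         total += s
--     return total
-- ===== Notes on version B (the rewrite author's own statement) =====
-- stated objective: alternative
-- what changed: Replaces the memoized recursive DFS with a -1 sentinel table by a non-recursive bottom-up DP: collect (value,i,j) triples, sort ascending by value, and fill dp in that order from already-computed strictly-smaller neighbors, accumulating the total in the same pass.
-- outside the precondition, e.g. on countDecreasingPathsMatrix(1, []): A returns 1, B raises IndexError
import Mathlib
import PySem

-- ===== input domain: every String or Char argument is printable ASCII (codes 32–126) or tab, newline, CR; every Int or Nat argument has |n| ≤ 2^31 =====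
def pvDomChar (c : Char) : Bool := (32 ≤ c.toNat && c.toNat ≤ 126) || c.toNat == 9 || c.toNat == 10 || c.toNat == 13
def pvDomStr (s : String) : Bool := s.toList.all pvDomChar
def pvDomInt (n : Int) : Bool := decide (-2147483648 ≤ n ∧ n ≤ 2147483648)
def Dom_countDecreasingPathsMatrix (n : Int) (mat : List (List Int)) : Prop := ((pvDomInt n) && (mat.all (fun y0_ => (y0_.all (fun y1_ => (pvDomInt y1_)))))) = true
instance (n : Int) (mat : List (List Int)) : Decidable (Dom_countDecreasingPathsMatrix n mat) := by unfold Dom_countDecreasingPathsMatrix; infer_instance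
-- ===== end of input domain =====

-- B replaces A's memoized recursive DFS (dp table with -1 sentinels) by a non-recursive
-- bottom-up DP over the cells sorted ascending by value; same O(n^2) result, no recursion.

-- ===== PORT A =====
-- the literal delta list [[0,1],[1,0],[-1,0],[0,-1]] both Pythons iterate
def pvDeltas : List (Int × Int) := [(0, 1), (1, 0), (-1, 0), (0, -1)]
-- mat[x][y] (exact for the in-range, nonnegative indices the admitted inputs reach)
def pvMval (mat : List (List Int)) (x y : Int) : Int :=
  PySem.List.pyGetD (PySem.List.pyGetD mat x []) y 0
-- dp[x][y] is read with pvMval too: the same in-range nested list indexing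
def pvDpWrite (dp : List (List Int)) (x y : Int) (v : Int) : List (List Int) :=
  dp.set x.toNat ((PySem.List.pyGetD dp x []).set y.toNat v)

-- CountDecreasingPathsCell, with a fuel argument making the (value-decreasing, hence
-- terminating) Python recursion structural; fuel n²+1 at the call site always suffices.
-- The 'for i in range(4)' loop threads (ans, dp) through an Option (none = fuel ran out).
def pvCellA (mat : List (List Int)) (n : Int) :
    Nat → Int → Int → List (List Int) → Option (Int × List (List Int))
  | 0, _, _, _ => none
  | f + 1, x, y, dp =>
    if pvMval dp x y ≠ -1 then some (pvMval dp x y, dp)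
    else
      match pvDeltas.foldl (fun acc d =>
        match acc with
        | none => none
        | some (ans, dp1) =>
          if 0 ≤ x + d.1 ∧ x + d.1 < n ∧ 0 ≤ y + d.2 ∧ y + d.2 < n ∧
              pvMval mat (x + d.1) (y + d.2) < pvMval mat x y then
            match pvCellA mat n f (x + d.1) (y + d.2) dp1 with
            | none => none
            | some (v, dp2) => some (ans + v, dp2)
          else some (ans, dp1)) (some (1, dp)) with
      | none => none
      | some (ans, dp1) => some (ans, pvDpWrite dp1 x y ans)

def countDecreasingPathsMatrix (n : Int) (mat : List (List Int)) : Int :=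
  -- dp initialised to -1 by nested append loops, as in A
  let dp0 := (PySem.List.pyRange 0 n 1).foldl
    (fun dp _i => dp ++ [(PySem.List.pyRange 0 n 1).foldl (fun l _j => l ++ [(-1 : Int)]) []]) []
  -- sum loop; the 'none' fallback is unreachable: the fuel n²+1 exceeds the recursion depth
  let r := (PySem.List.pyRange 0 n 1).foldl
    (fun st i => (PySem.List.pyRange 0 n 1).foldl
      (fun st j =>
        match pvCellA mat n (n.toNat * n.toNat + 1) i j st.2 with
        | none => st
        | some (v, dp') => (st.1 + v, dp')) st) ((0 : Int), dp0)
  r.1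

-- ===== PORT B =====
def countDecreasingPathsMatrix_alt (n : Int) (mat : List (List Int)) : Int :=
  let cells := (PySem.List.pyRange 0 n 1).foldl
    (fun cs i => (PySem.List.pyRange 0 n 1).foldl
      (fun cs j => cs ++ [(pvMval mat i j, i, j)]) cs) []
  let sortedCells := PySem.List.sorted cells (fun c => c.1) false
  let r := sortedCells.foldl
    (fun st c =>
      let s := pvDeltas.foldl
        (fun s d =>
          if 0 ≤ c.2.1 + d.1 ∧ c.2.1 + d.1 < n ∧ 0 ≤ c.2.2 + d.2 ∧ c.2.2 + d.2 < n ∧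
              pvMval mat (c.2.1 + d.1) (c.2.2 + d.2) < c.1 then
            s + st.2.getD (c.2.1 + d.1, c.2.2 + d.2) 0
          else s) 1
      (st.1 + s, st.2.insert (c.2.1, c.2.2) s))
    ((0 : Int), (PySem.Dict.empty : PySem.Dict (Int × Int) Int))
  r.1

-- ===== PRECONDITION & SPEC =====
-- Pre_ asks for a genuine n×n matrix: outside it Python A raises IndexError reading
-- mat[i][j] — except the degenerate n = 1 short-matrix case, where A returns 1 without
-- ever touching mat (every neighbour check short-circuits); B reads mat[0][0] and raises
-- there, so that accidental corner is excluded too.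
def Pre_countDecreasingPathsMatrix (n : Int) (mat : List (List Int)) : Prop :=
  n ≤ mat.length ∧ ∀ i < n.toNat, n ≤ ((mat.getD i []).length : Int)
instance (n : Int) (mat : List (List Int)) : Decidable (Pre_countDecreasingPathsMatrix n mat) := by
  unfold Pre_countDecreasingPathsMatrix; infer_instance

def pvWitness_countDecreasingPathsMatrix : Int × List (List Int) := (2, [[1, 2], [3, 4]])

def Spec_countDecreasingPathsMatrix (n : Int) (mat : List (List Int)) (out : Int) : Prop := out = countDecreasingPathsMatrix_alt n mat
instance (n : Int) (mat : List (List Int)) (out : Int) : Decidable (Spec_countDecreasingPathsMatrix n mat out) := by unfold Spec_countDecreasingPathsMatrix; infer_instance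

-- ===== CLAIM (what is proved, stated in full; the proofs are below) =====
def Claim_equal_countDecreasingPathsMatrix : Prop := ∀ (n : Int) (mat : List (List Int)), Dom_countDecreasingPathsMatrix n mat → Pre_countDecreasingPathsMatrix n mat → Spec_countDecreasingPathsMatrix n mat (countDecreasingPathsMatrix n mat)

-- ===== LEMMAS AND PROOFS =====

-- the four-neighbour accumulation both programs (and the reference function pvG) perform
def pvStep (n : Int) (mat : List (List Int)) (v : Int) (look : Int → Int → Int) (x y : Int) : Int :=
  pvDeltas.foldl
    (fun s d =>
      if 0 ≤ x + d.1 ∧ x + d.1 < n ∧ 0 ≤ y + d.2 ∧ y + d.2 < n ∧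
          pvMval mat (x + d.1) (y + d.2) < v then
        s + look (x + d.1) (y + d.2)
      else s) 1

-- reference count of decreasing paths from a cell, with fuel
def pvG (n : Int) (mat : List (List Int)) : Nat → Int → Int → Int
  | 0, _, _ => 0
  | f + 1, x, y => pvStep n mat (pvMval mat x y) (fun a b => pvG n mat f a b) x y

-- number of cells with strictly smaller value: the recursion measure
def pvMu (n : Int) (mat : List (List Int)) (x y : Int) : Nat :=
  ((Finset.range n.toNat ×ˢ Finset.range n.toNat).filter
    (fun p => pvMval mat p.1 p.2 < pvMval mat x y)).card

-- the canonical value: enough fuel for every cell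
def pvGG (n : Int) (mat : List (List Int)) (x y : Int) : Int :=
  pvG n mat (n.toNat * n.toNat + 1) x y

lemma pvStep_congr {n : Int} {mat : List (List Int)} {v : Int} {x y : Int}
    (look1 look2 : Int → Int → Int)
    (h : ∀ a b, 0 ≤ a → a < n → 0 ≤ b → b < n → pvMval mat a b < v → look1 a b = look2 a b) :
    pvStep n mat v look1 x y = pvStep n mat v look2 x y := by
  unfold pvStep
  have : (fun (s : Int) (d : Int × Int) =>
      if 0 ≤ x + d.1 ∧ x + d.1 < n ∧ 0 ≤ y + d.2 ∧ y + d.2 < n ∧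
          pvMval mat (x + d.1) (y + d.2) < v then s + look1 (x + d.1) (y + d.2) else s) =
      (fun (s : Int) (d : Int × Int) =>
      if 0 ≤ x + d.1 ∧ x + d.1 < n ∧ 0 ≤ y + d.2 ∧ y + d.2 < n ∧
          pvMval mat (x + d.1) (y + d.2) < v then s + look2 (x + d.1) (y + d.2) else s) := by
    funext s d
    by_cases hc : 0 ≤ x + d.1 ∧ x + d.1 < n ∧ 0 ≤ y + d.2 ∧ y + d.2 < n ∧
        pvMval mat (x + d.1) (y + d.2) < v
    · simp only [if_pos hc, h _ _ hc.1 hc.2.1 hc.2.2.1 hc.2.2.2.1 hc.2.2.2.2]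
    · simp only [if_neg hc]
  rw [this]

lemma pvMu_lt {n : Int} {mat : List (List Int)} {x y nx ny : Int}
    (h1 : 0 ≤ nx) (h2 : nx < n) (h3 : 0 ≤ ny) (h4 : ny < n)
    (h5 : pvMval mat nx ny < pvMval mat x y) :
    pvMu n mat nx ny < pvMu n mat x y := by
  apply Finset.card_lt_card
  constructor
  · intro p hp
    simp only [Finset.mem_filter, Finset.mem_product, Finset.mem_range] at hp ⊢
    exact ⟨hp.1, lt_trans hp.2 h5⟩
  · intro hsub
    have hmem : (nx.toNat, ny.toNat) ∈
        (Finset.range n.toNat ×ˢ Finset.range n.toNat).filter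
          (fun p => pvMval mat p.1 p.2 < pvMval mat x y) := by
      simp only [Finset.mem_filter, Finset.mem_product, Finset.mem_range]
      refine ⟨⟨?_, ?_⟩, ?_⟩
      · omega
      · omega
      · simpa [Int.toNat_of_nonneg h1, Int.toNat_of_nonneg h3] using h5
    have := hsub hmem
    simp only [Finset.mem_filter, Finset.mem_product, Finset.mem_range,
      Int.toNat_of_nonneg h1, Int.toNat_of_nonneg h3] at this
    exact absurd this.2 (lt_irrefl _)

lemma pvMu_le (n : Int) (mat : List (List Int)) (x y : Int) :
    pvMu n mat x y ≤ n.toNat * n.toNat := by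
  calc pvMu n mat x y ≤ (Finset.range n.toNat ×ˢ Finset.range n.toNat).card :=
        Finset.card_filter_le _ _
    _ = n.toNat * n.toNat := by simp [Finset.card_product]

lemma pvStep_ge_one {n : Int} {mat : List (List Int)} {v : Int} {x y : Int}
    (look : Int → Int → Int) (hlook : ∀ a b, 0 ≤ look a b) :
    1 ≤ pvStep n mat v look x y := by
  unfold pvStep
  have key : ∀ (ds : List (Int × Int)) (init : Int),
      init ≤ ds.foldl (fun s d =>
        if 0 ≤ x + d.1 ∧ x + d.1 < n ∧ 0 ≤ y + d.2 ∧ y + d.2 < n ∧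
            pvMval mat (x + d.1) (y + d.2) < v then s + look (x + d.1) (y + d.2) else s) init := by
    intro ds
    induction ds with
    | nil => intro init; simp
    | cons d ds ih =>
      intro init
      simp only [List.foldl_cons]
      by_cases hc : 0 ≤ x + d.1 ∧ x + d.1 < n ∧ 0 ≤ y + d.2 ∧ y + d.2 < n ∧
          pvMval mat (x + d.1) (y + d.2) < v
      · rw [if_pos hc]
        have := ih (init + look (x + d.1) (y + d.2))
        have h0 := hlook (x + d.1) (y + d.2)
        omega
      · rw [if_neg hc]; exact ih init
  exact key pvDeltas 1

lemma pvG_nonneg (n : Int) (mat : List (List Int)) : ∀ (f : Nat) (x y : Int), 0 ≤ pvG n mat f x y := by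
  intro f
  induction f with
  | zero => intro x y; simp [pvG]
  | succ f ih =>
    intro x y
    have := pvStep_ge_one (n := n) (mat := mat) (v := pvMval mat x y) (x := x) (y := y)
      (fun a b => pvG n mat f a b) (fun a b => ih a b)
    calc (0 : Int) ≤ 1 := by norm_num
      _ ≤ _ := this

lemma pvG_stable (n : Int) (mat : List (List Int)) :
    ∀ (f1 : Nat) (f2 : Nat) (x y : Int), pvMu n mat x y < f1 → pvMu n mat x y < f2 →
      pvG n mat f1 x y = pvG n mat f2 x y := by
  intro f1
  induction f1 with
  | zero => intro f2 x y h1 _; omega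
  | succ f1 ih =>
    intro f2 x y h1 h2
    match f2 with
    | 0 => omega
    | f2 + 1 =>
      show pvStep _ _ _ _ _ _ = pvStep _ _ _ _ _ _
      apply pvStep_congr
      intro a b ha1 ha2 hb1 hb2 hv
      have hmu := pvMu_lt ha1 ha2 hb1 hb2 hv
      exact ih f2 a b (by omega) (by omega)

lemma pvG_eq_pvGG {n : Int} {mat : List (List Int)} {f : Nat} {x y : Int}
    (h : pvMu n mat x y < f) : pvG n mat f x y = pvGG n mat x y := by
  exact pvG_stable n mat f (n.toNat * n.toNat + 1) x y h
    (Nat.lt_succ_of_le (pvMu_le n mat x y))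

lemma pvGG_unfold (n : Int) (mat : List (List Int)) (x y : Int) :
    pvGG n mat x y = pvStep n mat (pvMval mat x y) (fun a b => pvGG n mat a b) x y := by
  show pvStep n mat (pvMval mat x y) (fun a b => pvG n mat (n.toNat * n.toNat) a b) x y = _
  apply pvStep_congr
  intro a b ha1 ha2 hb1 hb2 hv
  have hmu := pvMu_lt ha1 ha2 hb1 hb2 hv
  have hle := pvMu_le n mat x y
  exact pvG_eq_pvGG (by omega)

lemma pvGG_pos (n : Int) (mat : List (List Int)) (x y : Int) : 1 ≤ pvGG n mat x y := by
  rw [pvGG_unfold]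
  exact pvStep_ge_one _ (fun a b => pvG_nonneg n mat (n.toNat * n.toNat + 1) a b)

-- invariant of A's dp table: correct shape, every entry -1 or the true count
def pvInv (n : Int) (mat dp : List (List Int)) : Prop :=
  dp.length = n.toNat ∧ (∀ i, i < n.toNat → (dp.getD i []).length = n.toNat) ∧
  ∀ x y : Int, 0 ≤ x → x < n → 0 ≤ y → y < n →
    pvMval dp x y = -1 ∨ pvMval dp x y = pvGG n mat x y

lemma pvMval_eq {dp : List (List Int)} {x y : Int} (hx : 0 ≤ x) (hy : 0 ≤ y) :
    pvMval dp x y = (dp.getD x.toNat []).getD y.toNat 0 := by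
  simp [pvMval, PySem.List.pyGetD_of_nonneg _ _ hx, PySem.List.pyGetD_of_nonneg _ _ hy]

lemma pvDpWrite_read {dp : List (List Int)} {x y x' y' : Int} (v : Int)
    (hx : 0 ≤ x) (hy : 0 ≤ y) (hx' : 0 ≤ x') (hy' : 0 ≤ y')
    (hlen : x.toNat < dp.length) (hrow : y.toNat < (dp.getD x.toNat []).length) :
    pvMval (pvDpWrite dp x y v) x' y' =
      if x' = x ∧ y' = y then v else pvMval dp x' y' := by
  have hread' : pvMval dp x' y' = (dp.getD x'.toNat []).getD y'.toNat 0 := pvMval_eq hx' hy'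
  have hw : pvDpWrite dp x y v = dp.set x.toNat ((dp.getD x.toNat []).set y.toNat v) := by
    unfold pvDpWrite; rw [PySem.List.pyGetD_of_nonneg _ _ hx]
  rw [pvMval_eq hx' hy', hw, hread']
  by_cases hxx : x' = x
  · rw [hxx]
    have hself : (dp.set x.toNat ((dp.getD x.toNat []).set y.toNat v)).getD x.toNat [] =
        (dp.getD x.toNat []).set y.toNat v := by
      simp [List.getD, hlen]
    rw [hself]
    by_cases hyy : y' = y
    · rw [hyy]
      have hrow' : y.toNat < (dp[x.toNat]?.getD []).length := by simpa [List.getD] using hrow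
      simp [List.getD, hrow']
    · have hne : y.toNat ≠ y'.toNat := by omega
      simp [List.getD, List.getElem?_set_ne hne, hyy]
  · have hne : x.toNat ≠ x'.toNat := by omega
    simp [List.getD, List.getElem?_set_ne hne, hxx]

lemma pvDpWrite_shape {dp : List (List Int)} {x y : Int} (v : Int) (k : Nat)
    (hx : 0 ≤ x) (hlen : x.toNat < dp.length) :
    (pvDpWrite dp x y v).length = dp.length ∧
    ((pvDpWrite dp x y v).getD k []).length = ((dp.getD k []).length) := by
  unfold pvDpWrite
  rw [PySem.List.pyGetD_of_nonneg _ _ hx]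
  refine ⟨by simp, ?_⟩
  by_cases hk : k = x.toNat
  · subst hk; simp [List.getD, hlen]
  · have hne : x.toNat ≠ k := fun h => hk h.symm
    simp [List.getD, List.getElem?_set_ne hne]

lemma pvInv_write {n : Int} {mat dp : List (List Int)} {x y : Int}
    (hInv : pvInv n mat dp) (hx : 0 ≤ x) (hxn : x < n) (hy : 0 ≤ y) (hyn : y < n) :
    pvInv n mat (pvDpWrite dp x y (pvGG n mat x y)) := by
  obtain ⟨hlen, hrows, hent⟩ := hInv
  have hxl : x.toNat < dp.length := by omega
  have hyl : y.toNat < (dp.getD x.toNat []).length := by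
    rw [hrows x.toNat (by omega)]; omega
  refine ⟨?_, ?_, ?_⟩
  · rw [(pvDpWrite_shape _ 0 hx hxl).1, hlen]
  · intro i hi
    rw [(pvDpWrite_shape _ i hx hxl).2]
    exact hrows i hi
  · intro x' y' hx' hx'n hy' hy'n
    rw [pvDpWrite_read _ hx hy hx' hy' hxl hyl]
    by_cases hc : x' = x ∧ y' = y
    · rw [if_pos hc, hc.1, hc.2]; right; rfl
    · rw [if_neg hc]; exact hent x' y' hx' hx'n hy' hy'n

-- the port's delta loop computes the pure delta fold, threading the dp table
lemma pvGo_spec {n : Int} {mat : List (List Int)} (f : Nat) (x y : Int)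
    (hcell : ∀ x' y' dp, pvInv n mat dp → 0 ≤ x' → x' < n → 0 ≤ y' → y' < n →
      pvMu n mat x' y' < f →
      ∃ dp', pvCellA mat n f x' y' dp = some (pvGG n mat x' y', dp') ∧ pvInv n mat dp')
    (hmu : pvMu n mat x y ≤ f) :
    ∀ (ds : List (Int × Int)) (ans : Int) (dp : List (List Int)), pvInv n mat dp →
      ∃ dp',
        ds.foldl (fun acc d =>
          match acc with
          | none => none
          | some (ans, dp1) =>
            if 0 ≤ x + d.1 ∧ x + d.1 < n ∧ 0 ≤ y + d.2 ∧ y + d.2 < n ∧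
                pvMval mat (x + d.1) (y + d.2) < pvMval mat x y then
              match pvCellA mat n f (x + d.1) (y + d.2) dp1 with
              | none => none
              | some (v, dp2) => some (ans + v, dp2)
            else some (ans, dp1)) (some (ans, dp)) =
          some (ds.foldl (fun s d =>
            if 0 ≤ x + d.1 ∧ x + d.1 < n ∧ 0 ≤ y + d.2 ∧ y + d.2 < n ∧
                pvMval mat (x + d.1) (y + d.2) < pvMval mat x y then
              s + pvGG n mat (x + d.1) (y + d.2)
            else s) ans, dp') ∧ pvInv n mat dp' := by
  intro ds
  induction ds with
  | nil => intro ans dp hInv; exact ⟨dp, rfl, hInv⟩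
  | cons d ds ih =>
    intro ans dp hInv
    simp only [List.foldl_cons]
    by_cases hc : 0 ≤ x + d.1 ∧ x + d.1 < n ∧ 0 ≤ y + d.2 ∧ y + d.2 < n ∧
        pvMval mat (x + d.1) (y + d.2) < pvMval mat x y
    · have hmu' : pvMu n mat (x + d.1) (y + d.2) < f := by
        have := pvMu_lt hc.1 hc.2.1 hc.2.2.1 hc.2.2.2.1 hc.2.2.2.2
        omega
      obtain ⟨dp1, heq, hInv1⟩ :=
        hcell (x + d.1) (y + d.2) dp hInv hc.1 hc.2.1 hc.2.2.1 hc.2.2.2.1 hmu'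
      rw [if_pos hc, if_pos hc, heq]
      exact ih (ans + pvGG n mat (x + d.1) (y + d.2)) dp1 hInv1
    · rw [if_neg hc, if_neg hc]
      exact ih ans dp hInv

lemma pvCellA_spec {n : Int} {mat : List (List Int)} :
    ∀ (f : Nat) (x y : Int) (dp : List (List Int)), pvInv n mat dp →
      0 ≤ x → x < n → 0 ≤ y → y < n → pvMu n mat x y < f →
      ∃ dp', pvCellA mat n f x y dp = some (pvGG n mat x y, dp') ∧ pvInv n mat dp' := by
  intro f
  induction f with
  | zero => intro x y dp _ _ _ _ _ h; omega
  | succ f ih =>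
    intro x y dp hInv hx hxn hy hyn hmu
    rcases hInv.2.2 x y hx hxn hy hyn with hread | hread
    · -- dp[x][y] = -1: compute via the delta loop, then write
      have hnot : ¬ (pvMval dp x y ≠ -1) := by rw [hread]; simp
      obtain ⟨dp1, heq, hInv1⟩ := pvGo_spec f x y (fun x' y' dp'' h1 h2 h3 h4 h5 h6 =>
        ih x' y' dp'' h1 h2 h3 h4 h5 h6) (by omega) pvDeltas 1 dp hInv
      have hval : (pvDeltas.foldl (fun s d =>
          if 0 ≤ x + d.1 ∧ x + d.1 < n ∧ 0 ≤ y + d.2 ∧ y + d.2 < n ∧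
              pvMval mat (x + d.1) (y + d.2) < pvMval mat x y then
            s + pvGG n mat (x + d.1) (y + d.2)
          else s) 1) = pvGG n mat x y := (pvGG_unfold n mat x y).symm
      refine ⟨pvDpWrite dp1 x y (pvGG n mat x y), ?_, pvInv_write hInv1 hx hxn hy hyn⟩
      show (if pvMval dp x y ≠ -1 then some (pvMval dp x y, dp) else _) = _
      rw [if_neg hnot, heq, hval]
    · -- dp[x][y] already holds the answer (which is ≥ 1, so ≠ -1)
      have hne : pvMval dp x y ≠ -1 := by
        rw [hread]; have := pvGG_pos n mat x y; omega
      refine ⟨dp, ?_, hInv⟩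
      show (if pvMval dp x y ≠ -1 then some (pvMval dp x y, dp) else _) = _
      rw [if_pos hne, hread]

lemma pvA_inner {n : Int} {mat : List (List Int)} (i : Int) (hi0 : 0 ≤ i) (hin : i < n) :
    ∀ (js : List Int) (s : Int) (dp : List (List Int)),
      (∀ j ∈ js, 0 ≤ j ∧ j < n) → pvInv n mat dp →
      (js.foldl (fun st j =>
        match pvCellA mat n (n.toNat * n.toNat + 1) i j st.2 with
        | none => st
        | some (v, dp') => (st.1 + v, dp')) (s, dp)).1 =
          s + (js.map (fun j => pvGG n mat i j)).sum ∧
      pvInv n mat (js.foldl (fun st j =>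
        match pvCellA mat n (n.toNat * n.toNat + 1) i j st.2 with
        | none => st
        | some (v, dp') => (st.1 + v, dp')) (s, dp)).2 := by
  intro js
  induction js with
  | nil => intro s dp _ hInv; exact ⟨by simp, hInv⟩
  | cons j js ihj =>
    intro s dp hmem hInv
    obtain ⟨hj0, hjn⟩ := hmem j (List.mem_cons_self)
    obtain ⟨dp1, heq, hInv1⟩ := pvCellA_spec (n.toNat * n.toNat + 1) i j dp hInv hi0 hin hj0 hjn
      (by have := pvMu_le n mat i j; omega)
    simp only [List.foldl_cons, heq, List.map_cons, List.sum_cons]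
    have hrec := ihj (s + pvGG n mat i j) dp1 (fun j' hj' => hmem j' (List.mem_cons_of_mem _ hj')) hInv1
    exact ⟨by rw [hrec.1]; ring, hrec.2⟩

lemma pvA_outer {n : Int} {mat : List (List Int)} :
    ∀ (is : List Int) (s : Int) (dp : List (List Int)),
      (∀ i ∈ is, 0 ≤ i ∧ i < n) → pvInv n mat dp →
      (is.foldl (fun st i => (PySem.List.pyRange 0 n 1).foldl
        (fun st j =>
          match pvCellA mat n (n.toNat * n.toNat + 1) i j st.2 with
          | none => st
          | some (v, dp') => (st.1 + v, dp')) st) (s, dp)).1 =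
        s + (is.map (fun i =>
          ((PySem.List.pyRange 0 n 1).map (fun j => pvGG n mat i j)).sum)).sum ∧
      pvInv n mat (is.foldl (fun st i => (PySem.List.pyRange 0 n 1).foldl
        (fun st j =>
          match pvCellA mat n (n.toNat * n.toNat + 1) i j st.2 with
          | none => st
          | some (v, dp') => (st.1 + v, dp')) st) (s, dp)).2 := by
  intro is
  induction is with
  | nil => intro s dp _ hInv; exact ⟨by simp, hInv⟩
  | cons i is ihi =>
    intro s dp hmem hInv
    obtain ⟨hi0, hin⟩ := hmem i (List.mem_cons_self)
    have hinner := pvA_inner i hi0 hin (PySem.List.pyRange 0 n 1) s dp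
      (fun j hj => by
        rw [PySem.List.mem_pyRange_one] at hj
        exact ⟨hj.1, hj.2⟩) hInv
    simp only [List.foldl_cons, List.map_cons, List.sum_cons]
    set st1 := (PySem.List.pyRange 0 n 1).foldl
        (fun st j =>
          match pvCellA mat n (n.toNat * n.toNat + 1) i j st.2 with
          | none => st
          | some (v, dp') => (st.1 + v, dp')) (s, dp) with hst1
    have hrec := ihi st1.1 st1.2 (fun i' hi' => hmem i' (List.mem_cons_of_mem _ hi')) hinner.2
    refine ⟨?_, hrec.2⟩
    rw [hrec.1, hinner.1]
    ring

lemma pvA_eq_sum (n : Int) (mat : List (List Int)) :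
    countDecreasingPathsMatrix n mat =
      ((PySem.List.pyRange 0 n 1).map (fun i =>
        ((PySem.List.pyRange 0 n 1).map (fun j => pvGG n mat i j)).sum)).sum := by
  have hdp0 : (PySem.List.pyRange 0 n 1).foldl
      (fun dp _i => dp ++ [(PySem.List.pyRange 0 n 1).foldl (fun l _j => l ++ [(-1 : Int)]) []]) [] =
      List.replicate n.toNat (List.replicate n.toNat (-1 : Int)) := by
    rw [PySem.List.foldl_append_eq_flatMap
      (fun _ => [(PySem.List.pyRange 0 n 1).foldl (fun l _j => l ++ [(-1 : Int)]) []])]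
    rw [PySem.List.foldl_append_eq_flatMap (fun _ => [(-1 : Int)])]
    rw [← List.map_eq_flatMap, ← List.map_eq_flatMap]
    simp [List.map_const', PySem.List.length_pyRange_one]
  have hInv0 : pvInv n mat (List.replicate n.toNat (List.replicate n.toNat (-1 : Int))) := by
    refine ⟨by simp, ?_, ?_⟩
    · intro i hi
      simp [List.getD, hi]
    · intro x y hx hxn hy hyn
      left
      rw [pvMval_eq hx hy]
      have hx' : x.toNat < n.toNat := by omega
      have hy' : y.toNat < n.toNat := by omega
      simp [List.getD, hx', hy']
  have houter := pvA_outer (n := n) (mat := mat) (PySem.List.pyRange 0 n 1) 0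
    (List.replicate n.toNat (List.replicate n.toNat (-1 : Int)))
    (fun i hi => by
      rw [PySem.List.mem_pyRange_one] at hi
      exact ⟨hi.1, hi.2⟩) hInv0
  show ((PySem.List.pyRange 0 n 1).foldl _ ((0 : Int), (PySem.List.pyRange 0 n 1).foldl
      (fun dp _i => dp ++ [(PySem.List.pyRange 0 n 1).foldl (fun l _j => l ++ [(-1 : Int)]) []]) [])).1 = _
  rw [hdp0, houter.1]
  ring

lemma pvB_loop {n : Int} {mat : List (List Int)} :
    ∀ (rest : List (Int × Int × Int)) (total : Int) (dict : PySem.Dict (Int × Int) Int),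
      (∀ c ∈ rest, c.1 = pvMval mat c.2.1 c.2.2 ∧ 0 ≤ c.2.1 ∧ c.2.1 < n ∧ 0 ≤ c.2.2 ∧ c.2.2 < n) →
      rest.Pairwise (fun a b => a.1 ≤ b.1) →
      (∀ x y : Int, 0 ≤ x → x < n → 0 ≤ y → y < n →
        ((pvMval mat x y, x, y) ∈ rest ∨ dict.get? (x, y) = some (pvGG n mat x y))) →
      (rest.foldl (fun st c =>
        let s := pvDeltas.foldl
          (fun s d =>
            if 0 ≤ c.2.1 + d.1 ∧ c.2.1 + d.1 < n ∧ 0 ≤ c.2.2 + d.2 ∧ c.2.2 + d.2 < n ∧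
                pvMval mat (c.2.1 + d.1) (c.2.2 + d.2) < c.1 then
              s + st.2.getD (c.2.1 + d.1, c.2.2 + d.2) 0
            else s) 1
        (st.1 + s, st.2.insert (c.2.1, c.2.2) s)) (total, dict)).1 =
      total + (rest.map (fun c => pvGG n mat c.2.1 c.2.2)).sum := by
  intro rest
  induction rest with
  | nil => intro total dict _ _ _; simp
  | cons c rest ih =>
    intro total dict hmem hpair hdict
    obtain ⟨hcv, hcx0, hcxn, hcy0, hcyn⟩ := hmem c (List.mem_cons_self)
    -- the inner delta fold is pvStep with the dict lookup; that lookup returns pvGG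
    have hstep : (pvDeltas.foldl
        (fun s d =>
          if 0 ≤ c.2.1 + d.1 ∧ c.2.1 + d.1 < n ∧ 0 ≤ c.2.2 + d.2 ∧ c.2.2 + d.2 < n ∧
              pvMval mat (c.2.1 + d.1) (c.2.2 + d.2) < c.1 then
            s + dict.getD (c.2.1 + d.1, c.2.2 + d.2) 0
          else s) 1) = pvGG n mat c.2.1 c.2.2 := by
      have h1 : (pvDeltas.foldl
          (fun s d =>
            if 0 ≤ c.2.1 + d.1 ∧ c.2.1 + d.1 < n ∧ 0 ≤ c.2.2 + d.2 ∧ c.2.2 + d.2 < n ∧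
                pvMval mat (c.2.1 + d.1) (c.2.2 + d.2) < c.1 then
              s + dict.getD (c.2.1 + d.1, c.2.2 + d.2) 0
            else s) 1) =
          pvStep n mat c.1 (fun a b => dict.getD (a, b) 0) c.2.1 c.2.2 := rfl
      rw [h1, pvStep_congr (look2 := fun a b => pvGG n mat a b), hcv, ← pvGG_unfold]
      intro a b ha0 han hb0 hbn hv
      rcases hdict a b ha0 han hb0 hbn with hin | hsome
      · exfalso
        rcases List.mem_cons.mp hin with heq | htail
        · have : pvMval mat a b = c.1 := congrArg Prod.fst heq
          omega
        · have := (List.pairwise_cons.mp hpair).1 _ htail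
          simp only at this
          omega
      · simp [PySem.Dict.getD, hsome]
    simp only [List.foldl_cons, List.map_cons, List.sum_cons]
    rw [hstep]
    rw [ih (total + pvGG n mat c.2.1 c.2.2) (dict.insert (c.2.1, c.2.2) (pvGG n mat c.2.1 c.2.2))
      (fun c' hc' => hmem c' (List.mem_cons_of_mem _ hc'))
      (List.pairwise_cons.mp hpair).2
      ?later]
    · ring
    case later =>
      intro x y hx0 hxn hy0 hyn
      rcases hdict x y hx0 hxn hy0 hyn with hin | hsome
      · rcases List.mem_cons.mp hin with heq | htail
        · right
          have hxy : (x, y) = (c.2.1, c.2.2) := by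
            have h1 : x = c.2.1 := congrArg (fun t => t.2.1) heq
            have h2 : y = c.2.2 := congrArg (fun t => t.2.2) heq
            rw [h1, h2]
          rw [hxy]
          have h1 : x = c.2.1 := congrArg (fun t => t.2.1) heq
          have h2 : y = c.2.2 := congrArg (fun t => t.2.2) heq
          rw [PySem.Dict.get?_insert_self, ← h1, ← h2]
        · left; exact htail
      · right
        by_cases hxy : (x, y) = (c.2.1, c.2.2)
        · rw [hxy, PySem.Dict.get?_insert_self]
          have h1 : x = c.2.1 := congrArg Prod.fst hxy
          have h2 : y = c.2.2 := congrArg Prod.snd hxy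
          rw [← h1, ← h2]
        · rw [PySem.Dict.get?_insert_of_ne _ _ hxy]
          exact hsome

lemma pvSum_flatMap {α β : Type} (R : List α) (g : α → List β) (h : β → Int) :
    ((R.flatMap g).map h).sum = (R.map (fun i => ((g i).map h).sum)).sum := by
  induction R with
  | nil => simp
  | cons a t ih => simp [ih]

lemma pvB_eq_sum (n : Int) (mat : List (List Int)) :
    countDecreasingPathsMatrix_alt n mat =
      ((PySem.List.pyRange 0 n 1).map (fun i =>
        ((PySem.List.pyRange 0 n 1).map (fun j => pvGG n mat i j)).sum)).sum := by
  have hcells : ((PySem.List.pyRange 0 n 1).foldl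
      (fun cs i => (PySem.List.pyRange 0 n 1).foldl
        (fun cs j => cs ++ [(pvMval mat i j, i, j)]) cs) []) =
      (PySem.List.pyRange 0 n 1).flatMap
        (fun i => (PySem.List.pyRange 0 n 1).map (fun j => (pvMval mat i j, i, j))) := by
    have hfn : (fun (cs : List (Int × Int × Int)) (i : Int) =>
        (PySem.List.pyRange 0 n 1).foldl (fun cs j => cs ++ [(pvMval mat i j, i, j)]) cs) =
        (fun cs i => cs ++ (PySem.List.pyRange 0 n 1).map (fun j => (pvMval mat i j, i, j))) := by
      funext cs i
      rw [PySem.List.foldl_append_eq_flatMap (fun j => [(pvMval mat i j, i, j)])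
        (PySem.List.pyRange 0 n 1) cs, ← List.map_eq_flatMap]
    rw [hfn, PySem.List.foldl_append_eq_flatMap _ (PySem.List.pyRange 0 n 1) [],
      List.nil_append]
  simp only [countDecreasingPathsMatrix_alt]
  rw [hcells]
  set cells := (PySem.List.pyRange 0 n 1).flatMap
    (fun i => (PySem.List.pyRange 0 n 1).map (fun j => (pvMval mat i j, i, j))) with hcellsdef
  have hmemcells : ∀ c ∈ cells, c.1 = pvMval mat c.2.1 c.2.2 ∧
      0 ≤ c.2.1 ∧ c.2.1 < n ∧ 0 ≤ c.2.2 ∧ c.2.2 < n := by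
    intro c hc
    rw [hcellsdef, List.mem_flatMap] at hc
    obtain ⟨i, hi, hc⟩ := hc
    rw [List.mem_map] at hc
    obtain ⟨j, hj, hc⟩ := hc
    rw [PySem.List.mem_pyRange_one] at hi hj
    rw [← hc]
    exact ⟨rfl, hi.1, hi.2, hj.1, hj.2⟩
  have hsorted := PySem.List.sorted_perm cells (fun c : Int × Int × Int => c.1) (rev := false)
  have hloop := pvB_loop (n := n) (mat := mat)
    (PySem.List.sorted cells (fun c => c.1) false) 0 PySem.Dict.empty
    (fun c hc => hmemcells c (hsorted.mem_iff.mp hc))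
    (PySem.List.sorted_pairwise cells (fun c : Int × Int × Int => c.1))
    (fun x y hx0 hxn hy0 hyn => by
      left
      rw [PySem.List.mem_sorted, hcellsdef, List.mem_flatMap]
      refine ⟨x, ?_, ?_⟩
      · rw [PySem.List.mem_pyRange_one]; exact ⟨hx0, hxn⟩
      · rw [List.mem_map]
        exact ⟨y, by rw [PySem.List.mem_pyRange_one]; exact ⟨hy0, hyn⟩, rfl⟩)
  rw [hloop, zero_add]
  rw [(hsorted.map (fun c => pvGG n mat c.2.1 c.2.2)).sum_eq, hcellsdef]
  rw [pvSum_flatMap]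
  simp only [List.map_map]
  rfl

-- ===== VERDICT (by name: the statement is the Claim_ definition above) =====
theorem countDecreasingPathsMatrix_spec : Claim_equal_countDecreasingPathsMatrix := by
  intro n mat _hdom _hpre
  unfold Spec_countDecreasingPathsMatrix
  rw [pvA_eq_sum, pvB_eq_sum]
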